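-- pv_equiv track=rewrite | github.com/FirePlank/Auto-Scrabble | main.py | check_word_validity
-- ===== SOURCE A (Python) =====
-- def check_word_validity(word, in_hand):
--     word_letters = list(word)
--     in_hand_letters = list(in_hand)
--     for letter in word_letters:
--         if letter in in_hand_letters:
--             in_hand_letters.remove(letter)
--         else:
--             return False
--     return True
-- ===== SOURCE B (Python) =====
-- def check_word_validity(word, in_hand):
--     return all(word.count(c) <= in_hand.count(c) for c in set(word))
-- ===== Notes on version B (the rewrite author's own statement) =====
-- stated objective: idiomatic
-- what changed: B compares letter frequencies (count of each distinct letter of word vs the hand) instead of A's destructive scan that copies the hand and removes letters one by one.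
import Mathlib
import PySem

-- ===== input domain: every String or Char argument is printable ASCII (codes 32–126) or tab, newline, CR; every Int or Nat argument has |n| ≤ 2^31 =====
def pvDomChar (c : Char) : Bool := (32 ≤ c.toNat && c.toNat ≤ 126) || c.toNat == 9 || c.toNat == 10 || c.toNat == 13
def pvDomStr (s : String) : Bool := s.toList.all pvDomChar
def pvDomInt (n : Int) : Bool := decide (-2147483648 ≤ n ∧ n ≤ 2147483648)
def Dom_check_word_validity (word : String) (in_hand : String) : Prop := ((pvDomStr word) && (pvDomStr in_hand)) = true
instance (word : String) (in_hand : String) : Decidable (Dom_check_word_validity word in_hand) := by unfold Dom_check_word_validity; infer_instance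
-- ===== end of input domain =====

-- B checks per-letter frequencies instead of A's copy-and-remove scan; return values proved equal on all inputs.

-- ===== PORT A =====
-- the for-loop over word's letters, carrying the shrinking in_hand_letters list;
-- 'letter in in_hand_letters' + '.remove(letter)' = PySem.List.remove? (none ↔ not a member)
def cwvLoop : List Char → List Char → Bool
  | [], _ => true
  | letter :: rest, hand =>
    match PySem.List.remove? hand letter with
    | some hand' => cwvLoop rest hand'
    | none => false

def check_word_validity (word : String) (in_hand : String) : Bool :=
  cwvLoop word.toList in_hand.toList

-- ===== PORT B =====
-- all(word.count(c) <= in_hand.count(c) for c in set(word));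
-- str.count of a single character = List.count over the characters
def check_word_validity_alt (word : String) (in_hand : String) : Bool :=
  (PySem.Set.ofList word.toList).all
    (fun c => word.toList.count c ≤ in_hand.toList.count c)

-- ===== PRECONDITION & SPEC =====
def Spec_check_word_validity (word : String) (in_hand : String) (out : Bool) : Prop := out = check_word_validity_alt word in_hand
instance (word : String) (in_hand : String) (out : Bool) : Decidable (Spec_check_word_validity word in_hand out) := by unfold Spec_check_word_validity; infer_instance

-- ===== CLAIM (what is proved, stated in full; the proofs are below) =====
def Claim_equal_check_word_validity : Prop := ∀ (word : String) (in_hand : String), Dom_check_word_validity word in_hand → Spec_check_word_validity word in_hand (check_word_validity word in_hand)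

-- ===== LEMMAS AND PROOFS =====

-- A's greedy remove-loop succeeds exactly when word is a sub-permutation of hand
theorem cwvLoop_eq_subperm (w : List Char) : ∀ h : List Char,
    cwvLoop w h = true ↔ List.Subperm w h := by
  induction w with
  | nil => intro h; simp [cwvLoop, List.nil_subperm]
  | cons c rest ih =>
    intro h
    simp only [cwvLoop]
    by_cases hm : c ∈ h
    · rw [PySem.List.remove?_eq_some_erase h c hm]
      have hperm : List.Perm h (c :: h.erase c) := List.perm_cons_erase hm
      constructor
      · intro hl
        exact ((List.subperm_cons c).mpr ((ih _).mp hl)).trans hperm.symm.subperm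
      · intro hs
        exact (ih _).mpr ((List.subperm_cons c).mp (hs.trans hperm.subperm))
    · rw [(PySem.List.remove?_eq_none_iff h c).mpr hm]
      simp only [Bool.false_eq_true, false_iff]
      exact fun hs => hm (hs.subset List.mem_cons_self)

theorem check_word_validity_spec : Claim_equal_check_word_validity := by
  intro word in_hand _
  unfold Spec_check_word_validity check_word_validity check_word_validity_alt
  rw [Bool.eq_iff_iff, cwvLoop_eq_subperm, List.subperm_ext_iff, List.all_eq_true]
  constructor
  · intro hc c hmem
    simp only [decide_eq_true_eq]
    exact hc c (((PySem.Set.mem_ofList _ c).mp hmem))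
  · intro hc c hmem
    have := hc c (((PySem.Set.mem_ofList _ c).mpr hmem))
    simpa using this
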